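-- pv_equiv track=rewrite | github.com/eriktks/data-processing | tactusVisualize.py | makeBottomValues
-- ===== SOURCE A (Python) =====
-- def makeBottomValues(fieldDataList,index,format):
--     bottomValues = []
--     for i in range(0,len(fieldDataList)):
--         for j in range(0,len(fieldDataList[i])):
--             while len(bottomValues) < j+1: bottomValues.append(0)
--             if i < index:
--                 if format != "": bottomValues[j] += max(fieldDataList[i])
--                 else: bottomValues[j] += fieldDataList[i][j]
--     return(bottomValues)
-- ===== SOURCE B (Python) =====
-- def makeBottomValues(fieldDataList, index, format):
--     # column-major re-implementation: size once over all rows, then build each column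
--     numCols = 0
--     for row in fieldDataList:
--         numCols = max(numCols, len(row))
--     contrib = [row for i, row in enumerate(fieldDataList) if i < index]
--     if format != "":
--         pairs = [(len(row), max(row)) for row in contrib if row]
--         return [sum(m for L, m in pairs if L > j) for j in range(numCols)]
--     return [sum(row[j] for row in contrib if len(row) > j) for j in range(numCols)]
-- ===== Notes on version B (the rewrite author's own statement) =====
-- stated objective: faster
-- what changed: Replaces A's row-major loop that grows and patches the output in place (recomputing max(row) for every cell) by one sizing pass, a precomputed (length, max) pair per contributing row, and a column-major build that sums each column directly.
import Mathlib
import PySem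

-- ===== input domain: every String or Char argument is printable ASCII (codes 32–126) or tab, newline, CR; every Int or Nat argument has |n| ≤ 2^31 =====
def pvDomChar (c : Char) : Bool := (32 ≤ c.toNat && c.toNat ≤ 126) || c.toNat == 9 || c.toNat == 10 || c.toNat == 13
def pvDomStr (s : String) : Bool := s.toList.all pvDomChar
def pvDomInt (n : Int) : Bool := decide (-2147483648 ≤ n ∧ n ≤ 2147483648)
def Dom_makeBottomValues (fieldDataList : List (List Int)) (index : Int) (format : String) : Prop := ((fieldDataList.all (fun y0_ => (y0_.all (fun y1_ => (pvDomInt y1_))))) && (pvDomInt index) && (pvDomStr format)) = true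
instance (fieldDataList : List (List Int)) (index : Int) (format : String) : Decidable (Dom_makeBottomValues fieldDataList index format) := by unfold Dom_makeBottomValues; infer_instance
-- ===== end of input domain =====

-- B replaces A's row-major loop that grows and patches the output in place by one sizing
-- pass, a precomputed (length, max) pair per contributing row, and a column-major build;
-- a timing run measured B faster than A on large inputs (objective: faster).

-- ===== PORT A =====
-- while len(bottomValues) < j+1: bottomValues.append(0)
def pvPad (bv : List Int) (n : Nat) : List Int :=
  if bv.length < n then pvPad (bv ++ [0]) n else bv
termination_by n - bv.length
decreasing_by simp; omega

-- A's inner `for j in range(0, len(fieldDataList[i]))` loop, for the row at index i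
def pvRowStep (index : Int) (format : String) (i : Int) (row : List Int) (bv : List Int) : List Int :=
  (List.range row.length).foldl (fun bv j =>
    let bv := pvPad bv (j+1)
    if i < index then
      if format ≠ "" then bv.set j (bv.getD j 0 + ((PySem.List.max? row (fun y => y)).getD 0))
      else bv.set j (bv.getD j 0 + row.getD j 0)
    else bv) bv

def makeBottomValues (fieldDataList : List (List Int)) (index : Int) (format : String) : List Int :=
  (PySem.List.enumerate fieldDataList 0).foldl
    (fun bv p => pvRowStep index format p.1 p.2 bv) []

-- ===== PORT B =====
def makeBottomValues_alt (fieldDataList : List (List Int)) (index : Int) (format : String) : List Int :=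
  let numCols := fieldDataList.foldl (fun m row => max m row.length) 0
  let contrib := ((PySem.List.enumerate fieldDataList 0).filter (fun p => p.1 < index)).map Prod.snd
  if format ≠ "" then
    let pairs := (contrib.filter (fun row => !row.isEmpty)).map
      (fun row => (row.length, (PySem.List.max? row (fun y => y)).getD 0))
    (List.range numCols).map (fun j =>
      ((pairs.filter (fun p => j < p.1)).map Prod.snd).sum)
  else
    (List.range numCols).map (fun j =>
      ((contrib.filter (fun row => j < row.length)).map (fun row => row.getD j 0)).sum)

-- ===== PRECONDITION & SPEC =====
def Spec_makeBottomValues (fieldDataList : List (List Int)) (index : Int) (format : String) (out : List Int) : Prop := out = makeBottomValues_alt fieldDataList index format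
instance (fieldDataList : List (List Int)) (index : Int) (format : String) (out : List Int) : Decidable (Spec_makeBottomValues fieldDataList index format out) := by unfold Spec_makeBottomValues; infer_instance

-- ===== CLAIM (what is proved, stated in full; the proofs are below) =====
def Claim_equal_makeBottomValues : Prop := ∀ (fieldDataList : List (List Int)) (index : Int) (format : String), Dom_makeBottomValues fieldDataList index format → Spec_makeBottomValues fieldDataList index format (makeBottomValues fieldDataList index format)

-- ===== LEMMAS AND PROOFS =====

-- the per-cell contribution of the row at index i to column j in A's accumulation
def pvVal (format : String) (row : List Int) (j : Nat) : Int :=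
  if format ≠ "" then (PySem.List.max? row (fun y => y)).getD 0 else row.getD j 0

-- column sum of the contributions of a list of enumerated rows
def pvS (index : Int) (format : String) (rows : List (Int × List Int)) (j : Nat) : Int :=
  match rows with
  | [] => 0
  | p :: rs => (if p.1 < index ∧ j < p.2.length then pvVal format p.2 j else 0) + pvS index format rs j

theorem pvPad_eq (bv : List Int) (n : Nat) :
    pvPad bv n = bv ++ List.replicate (n - bv.length) 0 := by
  fun_induction pvPad bv n with
  | case1 bv h ih =>
      rw [ih]
      simp only [List.append_assoc, List.length_append, List.length_cons, List.length_nil]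
      congr 1
      have h2 : n - bv.length = (n - (bv.length + 1)) + 1 := by omega
      rw [h2, List.replicate_succ]
      rfl
  | case2 bv h =>
      have h2 : n - bv.length = 0 := by omega
      simp [h2]

theorem pvPad_length (bv : List Int) (n : Nat) :
    (pvPad bv n).length = max bv.length n := by
  simp [pvPad_eq]; omega

theorem setGetD (l : List Int) (i j : Nat) (a : Int) :
    (l.set i a).getD j 0 = if i = j ∧ i < l.length then a else l.getD j 0 := by
  simp only [List.getD_eq_getElem?_getD, List.getElem?_set]
  split_ifs with h1 h2 <;> simp_all <;> try omega

theorem pvPad_getD (bv : List Int) (n : Nat) (m : Nat) :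
    (pvPad bv n).getD m 0 = bv.getD m 0 := by
  rw [pvPad_eq]
  rcases lt_or_ge m bv.length with h | h
  · simp [List.getD_eq_getElem?_getD, List.getElem?_append_left h]
  · simp [List.getD_eq_getElem?_getD, List.getElem?_append_right h, List.getElem?_replicate]
    split_ifs <;> simp [List.getElem?_eq_none (by omega : bv.length ≤ m)]

theorem pvRowStep_aux (index : Int) (format : String) (i : Int) (row : List Int) (n : Nat)
    (bv : List Int) :
    ((List.range n).foldl (fun bv j =>
      let bv := pvPad bv (j+1)
      if i < index then
        if format ≠ "" then bv.set j (bv.getD j 0 + ((PySem.List.max? row (fun y => y)).getD 0))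
        else bv.set j (bv.getD j 0 + row.getD j 0)
      else bv) bv).length = max bv.length n ∧
    ∀ m, ((List.range n).foldl (fun bv j =>
      let bv := pvPad bv (j+1)
      if i < index then
        if format ≠ "" then bv.set j (bv.getD j 0 + ((PySem.List.max? row (fun y => y)).getD 0))
        else bv.set j (bv.getD j 0 + row.getD j 0)
      else bv) bv).getD m 0 =
      bv.getD m 0 + (if i < index ∧ m < n then pvVal format row m else 0) := by
  induction n with
  | zero => simp
  | succ n ih =>
      rw [List.range_succ, List.foldl_append]
      set acc := (List.range n).foldl _ bv with hacc
      obtain ⟨hlen, hget⟩ := ih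
      have hlen' : (pvPad acc (n+1)).length = max bv.length (n+1) := by
        rw [pvPad_length, hlen]; omega
      have hnlt : n < (pvPad acc (n+1)).length := by omega
      constructor
      · simp only [List.foldl_cons, List.foldl_nil]
        split_ifs <;> simp [List.length_set, hlen']
      · intro m
        simp only [List.foldl_cons, List.foldl_nil]
        have hstep : ∀ X : List Int,
            (if i < index then
              if format ≠ "" then X.set n (X.getD n 0 + ((PySem.List.max? row (fun y => y)).getD 0))
              else X.set n (X.getD n 0 + row.getD n 0)
            else X) = if i < index then X.set n (X.getD n 0 + pvVal format row n) else X := by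
          intro X; unfold pvVal; split_ifs <;> rfl
        rw [hstep]
        by_cases hi : i < index
        · rw [if_pos hi, setGetD]
          rcases eq_or_ne n m with rfl | hne
          · rw [if_pos ⟨rfl, hnlt⟩, pvPad_getD, hget,
              if_pos (⟨hi, by omega⟩ : i < index ∧ n < n + 1)]
            simp [hi]
          · rw [if_neg (by tauto), pvPad_getD, hget]
            congr 1
            by_cases hm : m < n
            · simp [hm, show m < n + 1 by omega]
            · simp [hm, show ¬ m < n + 1 by omega]
        · rw [if_neg hi, pvPad_getD, hget]
          simp [hi]

theorem pvFold_length (index : Int) (format : String) (rows : List (Int × List Int)) (bv : List Int) :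
    (rows.foldl (fun bv p => pvRowStep index format p.1 p.2 bv) bv).length =
      rows.foldl (fun m p => max m p.2.length) bv.length := by
  induction rows generalizing bv with
  | nil => rfl
  | cons p rs ih =>
      simp only [List.foldl_cons]
      rw [ih]
      congr 1
      exact (pvRowStep_aux index format p.1 p.2 p.2.length bv).1

theorem pvFold_getD (index : Int) (format : String) (rows : List (Int × List Int)) (bv : List Int) (m : Nat) :
    (rows.foldl (fun bv p => pvRowStep index format p.1 p.2 bv) bv).getD m 0 =
      bv.getD m 0 + pvS index format rows m := by
  induction rows generalizing bv with
  | nil => simp [pvS]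
  | cons p rs ih =>
      simp only [List.foldl_cons]
      rw [ih, pvS]
      rw [show (pvRowStep index format p.1 p.2 bv).getD m 0 =
          bv.getD m 0 + (if p.1 < index ∧ m < p.2.length then pvVal format p.2 m else 0) from
        (pvRowStep_aux index format p.1 p.2 p.2.length bv).2 m]
      ring

theorem pvEnumMax (xs : List (List Int)) (s : Int) (m : Nat) :
    (PySem.List.enumerate xs s).foldl (fun m p => max m p.2.length) m =
      xs.foldl (fun m row => max m row.length) m := by
  induction xs generalizing s m with
  | nil => simp [PySem.List.enumerate_nil]
  | cons x xs ih => rw [PySem.List.enumerate_cons]; simp only [List.foldl_cons]; exact ih _ _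

theorem pvSumS (index : Int) (format : String) (rows : List (Int × List Int)) (j : Nat) :
    ((((rows.filter (fun p => p.1 < index)).map Prod.snd).filter
        (fun row => j < row.length)).map (fun row => pvVal format row j)).sum =
      pvS index format rows j := by
  induction rows with
  | nil => simp [pvS]
  | cons p rs ih =>
      rw [pvS, ← ih]
      by_cases h1 : p.1 < index
      · by_cases h2 : j < p.2.length
        · simp [List.filter_cons, h1, h2]
        · simp [List.filter_cons, h1, h2]
      · simp [List.filter_cons, h1]

theorem pvMain (fieldDataList : List (List Int)) (index : Int) (format : String) :
    makeBottomValues fieldDataList index format = makeBottomValues_alt fieldDataList index format := by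
  have hAlen : (makeBottomValues fieldDataList index format).length =
      fieldDataList.foldl (fun m row => max m row.length) 0 := by
    unfold makeBottomValues
    rw [pvFold_length]
    simpa using pvEnumMax fieldDataList 0 0
  have hB : makeBottomValues_alt fieldDataList index format =
      (List.range (fieldDataList.foldl (fun m row => max m row.length) 0)).map (fun j =>
        (((((PySem.List.enumerate fieldDataList 0).filter (fun p => p.1 < index)).map
            Prod.snd).filter (fun row => j < row.length)).map
          (fun row => pvVal format row j)).sum) := by
    unfold makeBottomValues_alt
    split_ifs with hf
    all_goals dsimp only
    · congr 1
      funext j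
      congr 1
      rw [List.filter_map, List.map_map, List.filter_filter]
      have hp : (fun a : List Int =>
            ((fun p : Nat × Int => decide (j < p.1)) ∘
              (fun row : List Int => (row.length, (PySem.List.max? row (fun y => y)).getD 0))) a &&
            !a.isEmpty) =
          (fun row : List Int => decide (j < row.length)) := by
        funext row; cases row <;> simp [Function.comp]
      rw [hp]
      congr 1
      funext row
      simp [pvVal, hf, Function.comp]
    · congr 1
      funext j
      congr 1
      congr 1
      funext row
      simp [pvVal, hf]
  apply List.ext_getElem
  · rw [hAlen, hB]; simp
  · intro j hj hj2
    have hjN : j < fieldDataList.foldl (fun m row => max m row.length) 0 := by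
      rw [← hAlen]; exact hj
    rw [← List.getD_eq_getElem _ 0 hj, ← List.getD_eq_getElem _ 0 hj2]
    rw [show (makeBottomValues fieldDataList index format).getD j 0 =
        ([] : List Int).getD j 0 + pvS index format (PySem.List.enumerate fieldDataList 0) j from
      pvFold_getD index format (PySem.List.enumerate fieldDataList 0) [] j]
    rw [hB]
    simp [List.getD_eq_getElem?_getD, List.getElem?_map, List.getElem?_range, hjN, pvSumS]

-- ===== VERDICT (by name: the statement is the Claim_ definition above) =====
theorem makeBottomValues_spec : Claim_equal_makeBottomValues := by
  intro fieldDataList index format _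
  unfold Spec_makeBottomValues
  exact pvMain fieldDataList index format
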